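-- pv_equiv track=rewrite | github.com/Eulring/DMNER | S1-EBD/uni/predict2BEL.py | char_level_align
-- ===== SOURCE A (Python) =====
-- def char_level_align(words, mention):
--     # ipdb.set_trace()
--     special_token = ['/', '-', ' ']
--     raw_text = ''.join(words)
--     raw_mention = mention.replace(' ', '')
--     n = len(raw_text)
--     m = len(raw_mention)
--     start = [-1 for i in range(n)]
--     end = [-1 for i in range(n)]
--     count = 0
--     spans = []
--     for i, word in enumerate(words):
--         start[count] = i
--         end[count + len(word) - 1] = i
--         wlen = len(word)
--         left, right = 0, 0
--         while (word[left] in special_token) and left < wlen - 1: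
--             start[count + left + 1] = i
--             left += 1
--         while (word[wlen - 1 - right] in special_token) and right < wlen - 1:
--             end[count + len(word) - 1 - right - 1] = i
--             right += 1
--
--         count += len(word)
--
--     for i in range(n - m + 1):
--         for j in range(m):
--             if raw_text[i+j] != raw_mention[j]:
--                 break
--             if j == m - 1:
--                 if start[i] > -1 and end[i + m - 1] > -1:
--                     l = start[i]
--                     r = end[i + m - 1]
--                     spans.append([l, r])
--     return spans
-- ===== SOURCE B (Python) =====
-- def char_level_align(words, mention):
--     special = {'/', '-', ' '}
--     target = mention.replace(' ', '')
--     m = len(target)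
--     if m == 0:
--         return []
--
--     def match_from(j, o):
--         # consume target starting at words[j][o], walking across word
--         # boundaries; return the word index and offset of the LAST matched
--         # character, or None if the match fails or text runs out
--         k = 0
--         while k < m:
--             if j >= len(words):
--                 return None
--             if o >= len(words[j]):
--                 j += 1
--                 o = 0
--                 continue
--             if words[j][o] != target[k]:
--                 return None
--             k += 1
--             o += 1
--         return j, o - 1
--
--     spans = []
--     for wi, w in enumerate(words):
--         for off in range(len(w)):
--             # a start inside a word is allowed only if every earlier
--             # character of that word is special
--             if not all(c in special for c in w[:off]):
--                 continue
--             hit = match_from(wi, off)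
--             if hit is None:
--                 continue
--             j, oe = hit
--             # the end is allowed only if every later char of its word is special
--             if all(c in special for c in words[j][oe + 1:]):
--                 spans.append([wi, j])
--     return spans
-- ===== Notes on version B (the rewrite author's own statement) =====
-- stated objective: alternative
-- what changed: B never concatenates the words and builds no per-character index/validity arrays: it iterates word/offset start positions directly, matches the mention across word boundaries with a cross-word cursor (match_from), and checks start/end validity by slicing only the two boundary words; Pre_ excludes inputs with an empty-string word, on which A raises IndexError.
import Mathlib
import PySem

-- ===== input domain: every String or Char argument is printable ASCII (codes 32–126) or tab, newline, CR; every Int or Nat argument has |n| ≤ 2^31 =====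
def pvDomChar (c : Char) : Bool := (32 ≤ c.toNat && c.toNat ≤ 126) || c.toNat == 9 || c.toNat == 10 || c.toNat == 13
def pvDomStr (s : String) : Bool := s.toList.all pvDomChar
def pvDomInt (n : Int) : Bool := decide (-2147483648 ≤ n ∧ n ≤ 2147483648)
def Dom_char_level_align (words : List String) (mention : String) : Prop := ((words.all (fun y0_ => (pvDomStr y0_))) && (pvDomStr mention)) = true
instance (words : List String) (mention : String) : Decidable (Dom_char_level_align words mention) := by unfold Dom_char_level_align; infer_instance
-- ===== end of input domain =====

-- ===== PORT A =====
-- Header: B is an alternative implementation that never concatenates the words and builds no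
-- per-character arrays: it iterates word/offset start positions, matches the mention across word
-- boundaries with a cross-word cursor, and checks validity by slicing the two boundary words.

-- special_token = ['/', '-', ' ']
def specialToken : List Char := ['/', '-', ' ']

-- while (word[left] in special_token) and left < wlen - 1: start[count+left+1] = i; left += 1
-- (fuel = wlen bounds the loop; word[left] is in range whenever the loop test is evaluated, so getD is exact)
def aLeftLoop (word : List Char) (i : Int) (count : Nat) : Nat → Nat → List Int → List Int
  | 0, _, start => start
  | fuel+1, left, start =>
    if word.getD left ' ' ∈ specialToken ∧ left < word.length - 1 then
      aLeftLoop word i count fuel (left+1) (start.set (count+left+1) i)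
    else start

-- while (word[wlen-1-right] in special_token) and right < wlen - 1: end[count+wlen-1-right-1] = i; right += 1
def aRightLoop (word : List Char) (i : Int) (count : Nat) : Nat → Nat → List Int → List Int
  | 0, _, e => e
  | fuel+1, right, e =>
    if word.getD (word.length - 1 - right) ' ' ∈ specialToken ∧ right < word.length - 1 then
      aRightLoop word i count fuel (right+1) (e.set (count + word.length - 1 - right - 1) i)
    else e

-- for j in range(m): if raw_text[i+j] != raw_mention[j]: break; if j == m-1: …append…
-- (all indices i+j, j, i, i+m-1 are in range on the executed domain, so getD is exact)
def aInner (rt rm : List Char) (st en : List Int) (m i : Nat) : Nat → List (List Int) → List (List Int)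
  | j, spans =>
    if _h : j < m then
      if rt.getD (i+j) ' ' ≠ rm.getD j ' ' then spans
      else
        aInner rt rm st en m i (j+1)
          (if j = m - 1 then
            if st.getD i (-1) > -1 ∧ en.getD (i+m-1) (-1) > -1 then
              spans ++ [[st.getD i (-1), en.getD (i+m-1) (-1)]]
            else spans
          else spans)
    else spans
  termination_by j _ => m - j

def char_level_align (words : List String) (mention : String) : List (List Int) :=
  let rt : List Char := PySem.Chars.join [] (words.map String.toList)   -- ''.join(words)
  let rm : List Char := PySem.Chars.replace mention.toList [' '] []     -- mention.replace(' ', '')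
  let n := rt.length
  let m := rm.length
  -- start = [-1]*n ; end = [-1]*n ; count = 0, then the per-word loop
  let res := (PySem.List.enumerate words).foldl (fun st p =>
      let word := p.2.toList
      let wlen := word.length
      let s1 := st.1.set st.2.2 p.1                       -- start[count] = i
      let e1 := st.2.1.set (st.2.2 + wlen - 1) p.1        -- end[count + len(word) - 1] = i
      (aLeftLoop word p.1 st.2.2 wlen 0 s1,
       aRightLoop word p.1 st.2.2 wlen 0 e1,
       st.2.2 + wlen)) (List.replicate n (-1 : Int), List.replicate n (-1 : Int), (0 : Nat))
  -- for i in range(n - m + 1): inner j-loop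
  (PySem.List.pyRange 0 ((n : Int) - (m : Int) + 1) 1).foldl
    (fun spans ii => aInner rt rm res.1 res.2.1 m ii.toNat 0 spans) []

-- ===== PORT B =====

-- match_from(j, o): the while loop over (j, o, k); each iteration either moves to the next word
-- (j += 1, o = 0) or consumes one target char (k += 1, o += 1), so tgt.length + words.length + 1
-- fuel bounds it; words[j][o] and target[k] are in range where read, so getD is exact
def matchFrom (words : List String) (tgt : List Char) : Nat → Nat → Nat → Nat → Option (Nat × Nat)
  | 0, _, _, _ => none   -- fuel exhausted: unreachable for the fuel the caller passes
  | fuel+1, j, o, k =>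
    if k < tgt.length then
      if j < words.length then
        if (words.getD j "").toList.length ≤ o then matchFrom words tgt fuel (j+1) 0 k
        else if (words.getD j "").toList.getD o ' ' ≠ tgt.getD k ' ' then none
        else matchFrom words tgt fuel j (o+1) (k+1)
      else none
    else some (j, o - 1)

def char_level_align_alt (words : List String) (mention : String) : List (List Int) :=
  let target : List Char := PySem.Chars.replace mention.toList [' '] []   -- mention.replace(' ', '')
  if target.length = 0 then []
  else
    (PySem.List.enumerate words).foldl (fun spans p =>
      (List.range p.2.toList.length).foldl (fun spans off =>
        -- a start inside a word is allowed only if every earlier char of that word is special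
        if (p.2.toList.take off).all (fun c => specialToken.contains c) then
          match matchFrom words target (target.length + words.length + 1) p.1.toNat off 0 with
          | none => spans
          | some (j, oe) =>
            -- the end is allowed only if every later char of its word is special
            -- (j < len(words) whenever match_from succeeds, so getD is exact)
            if ((words.getD j "").toList.drop (oe + 1)).all (fun c => specialToken.contains c) then
              spans ++ [[p.1, (j : Int)]]
            else spans
        else spans) spans) []

-- ===== PRECONDITION & SPEC =====
-- Pre_ excludes exactly the inputs containing an empty-string word: there A raises IndexError
-- (word[left] on an empty word); on every other input A returns normally.
def Pre_char_level_align (words : List String) (mention : String) : Prop :=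
  ∀ w ∈ words, w ≠ ""
instance (words : List String) (mention : String) : Decidable (Pre_char_level_align words mention) := by
  unfold Pre_char_level_align; infer_instance

def pvWitness_char_level_align : List String × String := (["ab", "-c"], "b -c")

def Spec_char_level_align (words : List String) (mention : String) (out : List (List Int)) : Prop := out = char_level_align_alt words mention
instance (words : List String) (mention : String) (out : List (List Int)) : Decidable (Spec_char_level_align words mention out) := by unfold Spec_char_level_align; infer_instance

-- ===== CLAIM (what is proved, stated in full; the proofs are below) =====
def Claim_equal_char_level_align : Prop := ∀ (words : List String) (mention : String), Dom_char_level_align words mention → Pre_char_level_align words mention → Spec_char_level_align words mention (char_level_align words mention)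

-- ===== LEMMAS AND PROOFS =====

-- Bool test for the special characters, and the per-word/column specifications
def isSp (c : Char) : Bool := specialToken.contains c

-- column o of word w is a valid mention start iff every earlier char of w is special
def sokSeg (w : List Char) : List Bool := (List.range w.length).map (fun o => (w.take o).all isSp)
-- column o of word w is a valid mention end iff every later char of w is special
def eokSeg (w : List Char) : List Bool := (List.range w.length).map (fun o => (w.drop (o+1)).all isSp)
def startSeg (w : List Char) (i : Int) : List Int :=
  (List.range w.length).map (fun o => if (w.take o).all isSp then i else -1)
def endSeg (w : List Char) (i : Int) : List Int :=
  (List.range w.length).map (fun o => if (w.drop (o+1)).all isSp then i else -1)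

def startAll : List String → Int → List Int
  | [], _ => []
  | w :: t, k => startSeg w.toList k ++ startAll t (k+1)
def endAll : List String → Int → List Int
  | [], _ => []
  | w :: t, k => endSeg w.toList k ++ endAll t (k+1)
def widxAll : List String → Int → List Int
  | [], _ => []
  | w :: t, k => List.replicate w.toList.length k ++ widxAll t (k+1)
def sokAll : List String → List Bool
  | [] => []
  | w :: t => sokSeg w.toList ++ sokAll t
def eokAll : List String → List Bool
  | [] => []
  | w :: t => eokSeg w.toList ++ eokAll t
def lenSum (ws : List String) : Nat := (ws.map (fun w => w.toList.length)).sum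

-- flattened text and the word/offset location of an absolute character position
def flatW (ws : List String) : List Char := (ws.map String.toList).flatten

def locOf : List String → Nat → Nat × Nat
  | [], p => (0, p)
  | w :: t, p =>
    if p < w.toList.length then (0, p)
    else ((locOf t (p - w.toList.length)).1 + 1, (locOf t (p - w.toList.length)).2)

-- the canonical per-position step both programs reduce to
def bStep (words : List String) (rm : List Char) (spans : List (List Int)) (i : Nat) : List (List Int) :=
  if ((flatW words).drop i).take rm.length = rm
      ∧ (sokAll words).getD i false = true ∧ (eokAll words).getD (i + rm.length - 1) false = true
  then spans ++ [[(widxAll words 0).getD i 0, (widxAll words 0).getD (i + rm.length - 1) 0]]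
  else spans

lemma all_take_mono (w : List Char) (j k : Nat) (hjk : j ≤ k) (h : (w.take k).all isSp = true) :
    (w.take j).all isSp = true := by
  have hj : w.take j = (w.take k).take j := by rw [List.take_take, Nat.min_eq_left hjk]
  rw [List.all_eq_true] at *
  intro x hx
  exact h x (List.mem_of_mem_take (hj ▸ hx))

lemma all_drop_mono (w : List Char) (j k : Nat) (hjk : k ≤ j) (h : (w.drop k).all isSp = true) :
    (w.drop j).all isSp = true := by
  have hj : w.drop j = (w.drop k).drop (j - k) := by rw [List.drop_drop]; congr 1; omega
  rw [List.all_eq_true] at *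
  intro x hx
  exact h x (List.mem_of_mem_drop (hj ▸ hx))

lemma startSeg_full (w : List Char) (i : Int) (h : (w.take (w.length - 1)).all isSp = true) :
    startSeg w i = List.replicate w.length i := by
  apply List.ext_getElem
  · simp [startSeg]
  intro o h1 h2
  have hw : o < w.length := by simpa [startSeg] using h1
  simp only [startSeg, List.getElem_map, List.getElem_range, List.getElem_replicate]
  rw [if_pos (all_take_mono w o (w.length - 1) (by omega) h)]

lemma startSeg_blocked (w : List Char) (i : Int) (l : Nat) (hlt : l < w.length)
    (hl : (w.take l).all isSp = true) (hc : isSp w[l] = false) :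
    startSeg w i = List.replicate (l+1) i ++ List.replicate (w.length - l - 1) (-1) := by
  apply List.ext_getElem
  · simp [startSeg]; omega
  intro o h1 h2
  have hw : o < w.length := by simpa [startSeg] using h1
  simp only [startSeg, List.getElem_map, List.getElem_range]
  by_cases ho : o ≤ l
  · rw [if_pos (all_take_mono w o l ho hl), List.getElem_append_left (by simp; omega),
      List.getElem_replicate]
  · have hf : (w.take o).all isSp = false := by
      rw [List.all_eq_false]
      refine ⟨(w.take o)[l]'(by simp; omega), List.getElem_mem _, ?_⟩
      rw [List.getElem_take]; simp [hc]
    rw [if_neg (by simp [hf]), List.getElem_append_right (by simp; omega), List.getElem_replicate]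

lemma endSeg_full (w : List Char) (i : Int) (h : (w.drop 1).all isSp = true) :
    endSeg w i = List.replicate w.length i := by
  apply List.ext_getElem
  · simp [endSeg]
  intro o h1 h2
  have hw : o < w.length := by simpa [endSeg] using h1
  simp only [endSeg, List.getElem_map, List.getElem_range, List.getElem_replicate]
  rw [if_pos (all_drop_mono w (o+1) 1 (by omega) h)]

lemma endSeg_blocked (w : List Char) (i : Int) (r : Nat) (hlt : r < w.length)
    (hr : (w.drop (w.length - r)).all isSp = true)
    (hc : isSp (w[w.length - 1 - r]'(by omega)) = false) :
    endSeg w i = List.replicate (w.length - 1 - r) (-1) ++ List.replicate (r+1) i := by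
  apply List.ext_getElem
  · simp [endSeg]; omega
  intro o h1 h2
  have hw : o < w.length := by simpa [endSeg] using h1
  simp only [endSeg, List.getElem_map, List.getElem_range]
  by_cases ho : o < w.length - 1 - r
  · have hf : (w.drop (o+1)).all isSp = false := by
      rw [List.all_eq_false]
      refine ⟨w[w.length - 1 - r]'(by omega), ?_, by simp [hc]⟩
      have : w[w.length - 1 - r]'(by omega) = (w.drop (o+1))[w.length - 1 - r - (o+1)]'(by simp; omega) := by
        rw [List.getElem_drop]; congr 1; omega
      rw [this]; exact List.getElem_mem _
    rw [if_neg (by simp [hf]), List.getElem_append_left (by simp; omega), List.getElem_replicate]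
  · have : (w.drop (o+1)).all isSp = true := all_drop_mono w (o+1) (w.length - r) (by omega) hr
    rw [if_pos this, List.getElem_append_right (by simp; omega), List.getElem_replicate]

lemma getD_append_right {α : Type} (l1 l2 : List α) (k : Nat) (v : α) :
    (l1 ++ l2).getD (l1.length + k) v = l2.getD k v := by
  simp [List.getD_eq_getElem?_getD, List.getElem?_append_right]

lemma getD_append_len {α : Type} {l1 : List α} {n : Nat} (l2 : List α) (d : Nat) (v : α)
    (h : l1.length = n) : (l1 ++ l2).getD (n + d) v = l2.getD d v := by
  subst h; exact getD_append_right l1 l2 d v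

lemma set_append_add {α : Type} (l1 l2 : List α) (k : Nat) (v : α) :
    (l1 ++ l2).set (l1.length + k) v = l1 ++ l2.set k v := by
  simp

lemma mem_special_iff (c : Char) : c ∈ specialToken ↔ isSp c = true := by
  simp [isSp]

lemma aLeftLoop_eq (w : List Char) (i : Int) (P : List Int) (pad : Nat)
    (hpad : w.length ≤ pad) :
    ∀ (fuel left : Nat), left < w.length → w.length - 1 - left < fuel →
      (w.take left).all isSp = true →
      aLeftLoop w i P.length fuel left
        (P ++ List.replicate (left+1) i ++ List.replicate (pad-left-1) (-1))
      = P ++ startSeg w i ++ List.replicate (pad - w.length) (-1) := by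
  intro fuel
  induction fuel with
  | zero => intro left h1 h2 h3; omega
  | succ fuel ih =>
    intro left hlt hfuel hall
    rw [aLeftLoop]
    have hgetD : w.getD left ' ' = w[left] := List.getD_eq_getElem w ' ' hlt
    by_cases hl1 : left < w.length - 1
    · by_cases hsp : isSp w[left] = true
      · rw [if_pos ⟨by rw [hgetD, mem_special_iff]; exact hsp, hl1⟩]
        have hset : (P ++ List.replicate (left+1) i ++ List.replicate (pad-left-1) (-1)).set
            (P.length + left + 1) i
            = P ++ List.replicate (left+1+1) i ++ List.replicate (pad-(left+1)-1) (-1) := by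
          obtain ⟨q, hq⟩ : ∃ q, pad - left - 1 = q + 1 := ⟨pad - left - 2, by omega⟩
          have e1 : P ++ List.replicate (left+1) i ++ List.replicate (pad-left-1) (-1)
              = (P ++ List.replicate (left+1) i) ++ ((-1) :: List.replicate q (-1)) := by
            rw [hq]; rfl
          have e2 : P.length + left + 1 = (P ++ List.replicate (left+1) i).length + 0 := by
            simp only [List.length_append, List.length_replicate]; omega
          rw [e1, e2, set_append_add, List.set_cons_zero,
            show pad - (left+1) - 1 = q by omega, List.replicate_succ' (n := left+1)]
          simp [List.append_assoc]
        rw [hset]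
        have hall' : (w.take (left+1)).all isSp = true := by
          rw [List.take_add_one, List.all_append, hall]
          simp [hlt, hsp]
        exact ih (left+1) (by omega) (by omega) hall'
      · rw [if_neg (by rw [hgetD, mem_special_iff]; tauto)]
        rw [startSeg_blocked w i left hlt hall (by simpa using hsp)]
        rw [show pad - left - 1 = (w.length - left - 1) + (pad - w.length) by omega]
        rw [List.replicate_add]
        simp [List.append_assoc]
    · have hleft : left = w.length - 1 := by omega
      rw [if_neg (by omega)]
      rw [startSeg_full w i (hleft ▸ hall)]
      rw [show pad - left - 1 = pad - w.length by omega, show left + 1 = w.length by omega]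

lemma aRightLoop_eq (w : List Char) (i : Int) (P : List Int) (pad : Nat) :
    ∀ (fuel right : Nat), right < w.length → w.length - 1 - right < fuel →
      (w.drop (w.length - right)).all isSp = true →
      aRightLoop w i P.length fuel right
        (P ++ List.replicate (w.length-1-right) (-1) ++ List.replicate (right+1) i ++ List.replicate (pad - w.length) (-1))
      = P ++ endSeg w i ++ List.replicate (pad - w.length) (-1) := by
  intro fuel
  induction fuel with
  | zero => intro right h1 h2 h3; omega
  | succ fuel ih =>
    intro right hlt hfuel hall
    rw [aRightLoop]
    have hb : w.length - 1 - right < w.length := by omega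
    have hgetD : w.getD (w.length - 1 - right) ' ' = w[w.length - 1 - right] :=
      List.getD_eq_getElem w ' ' hb
    by_cases hr1 : right < w.length - 1
    · by_cases hsp : isSp (w[w.length - 1 - right]'hb) = true
      · rw [if_pos ⟨by rw [hgetD, mem_special_iff]; exact hsp, hr1⟩]
        have hset : (P ++ List.replicate (w.length-1-right) (-1) ++ List.replicate (right+1) i
              ++ List.replicate (pad - w.length) (-1)).set (P.length + w.length - 1 - right - 1) i
            = P ++ List.replicate (w.length-1-(right+1)) (-1) ++ List.replicate ((right+1)+1) i
              ++ List.replicate (pad - w.length) (-1) := by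
          obtain ⟨a, ha⟩ : ∃ a, w.length - 1 - right = a + 1 := ⟨w.length - 2 - right, by omega⟩
          have e1 : P ++ List.replicate (w.length-1-right) (-1) ++ List.replicate (right+1) i
                ++ List.replicate (pad - w.length) (-1)
              = (P ++ List.replicate a (-1))
                ++ ((-1) :: (List.replicate (right+1) i ++ List.replicate (pad - w.length) (-1))) := by
            rw [ha, List.replicate_succ' (n := a)]
            simp [List.append_assoc]
          have e2 : P.length + w.length - 1 - right - 1 = (P ++ List.replicate a (-1)).length + 0 := by
            simp only [List.length_append, List.length_replicate]; omega
          rw [e1, e2, set_append_add, List.set_cons_zero,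
            show w.length - 1 - (right+1) = a by omega]
          simp [List.append_assoc, List.replicate_succ]
        rw [hset]
        have hall' : (w.drop (w.length - (right+1))).all isSp = true := by
          have hd : w.length - (right+1) = (w.length - 1 - right) := by omega
          rw [hd, List.drop_eq_getElem_cons hb, List.all_cons, hsp,
            show w.length - 1 - right + 1 = w.length - right by omega, hall]
          rfl
        exact ih (right+1) (by omega) (by omega) hall'
      · rw [if_neg (by rw [hgetD, mem_special_iff]; tauto)]
        rw [endSeg_blocked w i right hlt hall (by simpa using hsp)]
        simp [List.append_assoc]
    · have hre : right = w.length - 1 := by omega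
      rw [if_neg (by omega)]
      rw [endSeg_full w i (by rw [show (1:Nat) = w.length - right by omega]; exact hall)]
      rw [show w.length - 1 - right = 0 by omega, show right + 1 = w.length by omega]
      simp

lemma aStartWord (w : List Char) (hw : w ≠ []) (i : Int) (P : List Int) (pad : Nat)
    (hpad : w.length ≤ pad) :
    aLeftLoop w i P.length w.length 0 ((P ++ List.replicate pad (-1)).set P.length i)
    = P ++ startSeg w i ++ List.replicate (pad - w.length) (-1) := by
  have hw0 : 0 < w.length := List.length_pos_iff.mpr hw
  have hset : (P ++ List.replicate pad (-1)).set P.length i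
      = P ++ List.replicate (0+1) i ++ List.replicate (pad-0-1) (-1) := by
    obtain ⟨q, hq⟩ : ∃ q, pad = q + 1 := ⟨pad - 1, by omega⟩
    rw [show P.length = P.length + 0 by omega, set_append_add, hq, List.replicate_succ,
      List.set_cons_zero]
    simp
  rw [hset]
  exact aLeftLoop_eq w i P pad hpad w.length 0 hw0 (by omega) (by simp)

lemma aEndWord (w : List Char) (hw : w ≠ []) (i : Int) (P : List Int) (pad : Nat)
    (hpad : w.length ≤ pad) :
    aRightLoop w i P.length w.length 0 ((P ++ List.replicate pad (-1)).set (P.length + w.length - 1) i)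
    = P ++ endSeg w i ++ List.replicate (pad - w.length) (-1) := by
  have hw0 : 0 < w.length := List.length_pos_iff.mpr hw
  have hset : (P ++ List.replicate pad (-1)).set (P.length + w.length - 1) i
      = P ++ List.replicate (w.length-1-0) (-1) ++ List.replicate (0+1) i
        ++ List.replicate (pad - w.length) (-1) := by
    have e1 : P ++ List.replicate pad (-1)
        = (P ++ List.replicate (w.length-1) (-1))
          ++ ((-1) :: List.replicate (pad - w.length) (-1)) := by
      conv_lhs => rw [show pad = (w.length - 1) + (1 + (pad - w.length)) by omega,
        List.replicate_add, List.replicate_add]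
      simp [List.append_assoc]
    have e2 : P.length + w.length - 1 = (P ++ List.replicate (w.length-1) (-1)).length + 0 := by
      simp only [List.length_append, List.length_replicate]; omega
    rw [e1, e2, set_append_add, List.set_cons_zero]
    simp [List.append_assoc]
  rw [hset]
  exact aRightLoop_eq w i P pad w.length 0 hw0 (by omega) (by simp)

lemma length_startSeg (w : List Char) (i : Int) : (startSeg w i).length = w.length := by
  simp [startSeg]

lemma length_endSeg (w : List Char) (i : Int) : (endSeg w i).length = w.length := by
  simp [endSeg]

lemma phase1A : ∀ (ws : List String) (k : Int) (P Q : List Int), Q.length = P.length →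
    (∀ w ∈ ws, w ≠ "") →
    (PySem.List.enumerate ws k).foldl
      (fun (st : List Int × List Int × Nat) (p : Int × String) =>
        (aLeftLoop p.2.toList p.1 st.2.2 p.2.toList.length 0 (st.1.set st.2.2 p.1),
         aRightLoop p.2.toList p.1 st.2.2 p.2.toList.length 0
           (st.2.1.set (st.2.2 + p.2.toList.length - 1) p.1),
         st.2.2 + p.2.toList.length))
      (P ++ List.replicate (lenSum ws) (-1), Q ++ List.replicate (lenSum ws) (-1), P.length)
    = (P ++ startAll ws k, Q ++ endAll ws k, P.length + lenSum ws) := by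
  intro ws
  induction ws with
  | nil =>
    intro k P Q hQ hws
    rw [show PySem.List.enumerate ([]:List String) k = [] from rfl, List.foldl_nil,
      show lenSum [] = 0 from rfl, show startAll [] k = [] from rfl, show endAll [] k = [] from rfl]
    simp only [List.replicate_zero, List.append_nil, Nat.add_zero]
  | cons w t ih =>
    intro k P Q hQ hws
    have hw : w.toList ≠ [] := by
      intro hc
      exact hws w (by simp) (String.toList_eq_nil_iff.mp hc)
    have hlen : lenSum (w :: t) = w.toList.length + lenSum t := by simp [lenSum]
    have hpad : w.toList.length ≤ lenSum (w :: t) := by omega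
    rw [show PySem.List.enumerate (w :: t) k = (k, w) :: PySem.List.enumerate t (k+1) from rfl,
      List.foldl_cons]
    have hstart : aLeftLoop w.toList k P.length w.toList.length 0
        ((P ++ List.replicate (lenSum (w :: t)) (-1)).set P.length k)
        = (P ++ startSeg w.toList k) ++ List.replicate (lenSum t) (-1) := by
      rw [aStartWord w.toList hw k P (lenSum (w :: t)) hpad,
        show lenSum (w :: t) - w.toList.length = lenSum t by omega, List.append_assoc]
    have hend : aRightLoop w.toList k P.length w.toList.length 0
        ((Q ++ List.replicate (lenSum (w :: t)) (-1)).set (P.length + w.toList.length - 1) k)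
        = (Q ++ endSeg w.toList k) ++ List.replicate (lenSum t) (-1) := by
      rw [← hQ, aEndWord w.toList hw k Q (lenSum (w :: t)) hpad,
        show lenSum (w :: t) - w.toList.length = lenSum t by omega, List.append_assoc]
    simp only [hstart, hend]
    have ih' := ih (k+1) (P ++ startSeg w.toList k) (Q ++ endSeg w.toList k)
      (by simp [endSeg, startSeg, hQ]) (fun x hx => hws x (by simp [hx]))
    rw [show (P ++ startSeg w.toList k).length = P.length + w.toList.length by
      rw [List.length_append, length_startSeg]] at ih'
    rw [ih']
    simp only [Prod.mk.injEq]
    exact ⟨by simp [startAll, List.append_assoc], by simp [endAll, List.append_assoc], by omega⟩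

lemma corrStart : ∀ (ws : List String) (k : Int), 0 ≤ k → ∀ (pos : Nat), pos < lenSum ws →
    (startAll ws k).getD pos (-1)
      = (if (sokAll ws).getD pos false then (widxAll ws k).getD pos 0 else -1)
    ∧ 0 ≤ (widxAll ws k).getD pos 0 := by
  intro ws
  induction ws with
  | nil => intro k hk pos hpos; simp [lenSum] at hpos
  | cons w t ih =>
    intro k hk pos hpos
    rw [show startAll (w :: t) k = startSeg w.toList k ++ startAll t (k+1) from rfl,
      show sokAll (w :: t) = sokSeg w.toList ++ sokAll t from rfl,
      show widxAll (w :: t) k = List.replicate w.toList.length k ++ widxAll t (k+1) from rfl]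
    by_cases hp : pos < w.toList.length
    · rw [List.getD_append _ _ _ _ (by rw [length_startSeg]; exact hp),
        List.getD_append _ _ _ _ (by simp [sokSeg]; exact hp),
        List.getD_append _ _ _ _ (by simp; exact hp)]
      constructor
      · rw [List.getD_eq_getElem _ _ (by rw [length_startSeg]; exact hp),
          List.getD_eq_getElem _ _ (by simp [sokSeg]; exact hp),
          List.getD_eq_getElem _ _ (by simp; exact hp)]
        simp only [startSeg, sokSeg, List.getElem_map, List.getElem_range, List.getElem_replicate]
      · rw [List.getD_eq_getElem _ _ (by simp; exact hp), List.getElem_replicate]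
        exact hk
    · have hlen : lenSum (w :: t) = w.toList.length + lenSum t := by simp [lenSum]
      obtain ⟨d, hd⟩ : ∃ d, pos = w.toList.length + d := ⟨pos - w.toList.length, by omega⟩
      rw [hd, getD_append_len _ _ _ (length_startSeg w.toList k),
        getD_append_len _ _ _ (by simp [sokSeg]),
        getD_append_len _ _ _ (by simp)]
      exact ih (k+1) (by omega) d (by omega)

lemma corrEnd : ∀ (ws : List String) (k : Int), 0 ≤ k → ∀ (pos : Nat), pos < lenSum ws →
    (endAll ws k).getD pos (-1)
      = (if (eokAll ws).getD pos false then (widxAll ws k).getD pos 0 else -1)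
    ∧ 0 ≤ (widxAll ws k).getD pos 0 := by
  intro ws
  induction ws with
  | nil => intro k hk pos hpos; simp [lenSum] at hpos
  | cons w t ih =>
    intro k hk pos hpos
    rw [show endAll (w :: t) k = endSeg w.toList k ++ endAll t (k+1) from rfl,
      show eokAll (w :: t) = eokSeg w.toList ++ eokAll t from rfl,
      show widxAll (w :: t) k = List.replicate w.toList.length k ++ widxAll t (k+1) from rfl]
    by_cases hp : pos < w.toList.length
    · rw [List.getD_append _ _ _ _ (by rw [length_endSeg]; exact hp),
        List.getD_append _ _ _ _ (by simp [eokSeg]; exact hp),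
        List.getD_append _ _ _ _ (by simp; exact hp)]
      constructor
      · rw [List.getD_eq_getElem _ _ (by rw [length_endSeg]; exact hp),
          List.getD_eq_getElem _ _ (by simp [eokSeg]; exact hp),
          List.getD_eq_getElem _ _ (by simp; exact hp)]
        simp only [endSeg, eokSeg, List.getElem_map, List.getElem_range, List.getElem_replicate]
      · rw [List.getD_eq_getElem _ _ (by simp; exact hp), List.getElem_replicate]
        exact hk
    · have hlen : lenSum (w :: t) = w.toList.length + lenSum t := by simp [lenSum]
      obtain ⟨d, hd⟩ : ∃ d, pos = w.toList.length + d := ⟨pos - w.toList.length, by omega⟩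
      rw [hd, getD_append_len _ _ _ (length_endSeg w.toList k),
        getD_append_len _ _ _ (by simp [eokSeg]),
        getD_append_len _ _ _ (by simp)]
      exact ih (k+1) (by omega) d (by omega)

lemma aInner_zero (rt rm : List Char) (st en : List Int) (i : Nat) (spans : List (List Int)) :
    aInner rt rm st en 0 i 0 spans = spans := by
  rw [aInner]; simp

lemma innerEq (rt rm : List Char) (st en : List Int) (m i : Nat)
    (hm : 0 < m) (hrm : rm.length = m) (hin : i + m ≤ rt.length) :
    ∀ (K j : Nat) (spans : List (List Int)), j < m → m - 1 - j ≤ K →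
      aInner rt rm st en m i j spans =
        if (rt.drop (i+j)).take (m-j) = rm.drop j then
          (if st.getD i (-1) > -1 ∧ en.getD (i+m-1) (-1) > -1 then
            spans ++ [[st.getD i (-1), en.getD (i+m-1) (-1)]]
          else spans)
        else spans := by
  have base : ∀ (j : Nat) (spans : List (List Int)), j < m → j = m - 1 →
      aInner rt rm st en m i j spans =
        if (rt.drop (i+j)).take (m-j) = rm.drop j then
          (if st.getD i (-1) > -1 ∧ en.getD (i+m-1) (-1) > -1 then
            spans ++ [[st.getD i (-1), en.getD (i+m-1) (-1)]]
          else spans)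
        else spans := by
    intro j spans hj hj1
    rw [aInner, dif_pos hj]
    have hij : i + j < rt.length := by omega
    have hjr : j < rm.length := by omega
    rw [List.getD_eq_getElem rt ' ' hij, List.getD_eq_getElem rm ' ' hjr]
    have hdrop : (rt.drop (i+j)).take (m-j) = [rt[i+j]] := by
      rw [List.drop_eq_getElem_cons hij, show m - j = 0 + 1 by omega, List.take_succ_cons,
        List.take_zero]
    have hdropm : rm.drop j = [rm[j]] := by
      rw [List.drop_eq_getElem_cons hjr, show j + 1 = rm.length by omega, List.drop_length]
    rw [hdrop, hdropm]
    by_cases hc : rt[i+j] = rm[j]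
    · rw [if_neg (by simp [hc]), if_pos hj1, aInner, dif_neg (by omega),
        if_pos (show ([rt[i+j]] : List Char) = [rm[j]] by rw [hc])]
    · rw [if_pos (by simp [hc]), if_neg (by simp [hc])]
  intro K
  induction K with
  | zero =>
    intro j spans hj hK
    exact base j spans hj (by omega)
  | succ K ih =>
    intro j spans hj hK
    by_cases hj1 : j = m - 1
    · exact base j spans hj hj1
    · rw [aInner, dif_pos hj]
      have hij : i + j < rt.length := by omega
      have hjr : j < rm.length := by omega
      rw [List.getD_eq_getElem rt ' ' hij, List.getD_eq_getElem rm ' ' hjr]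
      have hdrop : (rt.drop (i+j)).take (m-j)
          = rt[i+j] :: ((rt.drop (i+(j+1))).take (m-(j+1))) := by
        rw [List.drop_eq_getElem_cons hij, show m - j = (m - (j+1)) + 1 by omega,
          List.take_succ_cons, show i+j+1 = i+(j+1) by omega]
      have hdropm : rm.drop j = rm[j] :: rm.drop (j+1) := List.drop_eq_getElem_cons hjr
      rw [hdrop, hdropm, if_neg hj1]
      have hcons : (rt[i+j] :: (rt.drop (i+(j+1))).take (m-(j+1)) = rm[j] :: rm.drop (j+1))
          ↔ (rt[i+j] = rm[j] ∧ (rt.drop (i+(j+1))).take (m-(j+1)) = rm.drop (j+1)) :=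
        List.cons_eq_cons
      by_cases hc : rt[i+j] = rm[j]
      · rw [if_neg (by simp [hc]), ih (j+1) spans (by omega) (by omega)]
        by_cases ht : (rt.drop (i+(j+1))).take (m-(j+1)) = rm.drop (j+1)
        · rw [if_pos ht, if_pos (hcons.mpr ⟨hc, ht⟩)]
        · rw [if_neg ht, if_neg (fun hcc => ht (hcons.mp hcc).2)]
      · rw [if_pos (by simp [hc]), if_neg (fun hcc => hc (hcons.mp hcc).1)]

lemma lenSum_eq (words : List String) :
    (words.map String.toList).flatten.length = lenSum words := by
  simp [lenSum, Function.comp_def]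

-- ===== new B-side lemmas =====

lemma lenSum_cons (w : String) (ws : List String) :
    lenSum (w :: ws) = w.toList.length + lenSum ws := by
  simp [lenSum]

lemma lenSum_append (a b : List String) : lenSum (a ++ b) = lenSum a + lenSum b := by
  simp [lenSum]

lemma lenSum_take_succ (words : List String) (j : Nat) (hj : j < words.length) :
    lenSum (words.take (j+1)) = lenSum (words.take j) + words[j].toList.length := by
  rw [List.take_add_one, List.getElem?_eq_getElem hj, Option.toList_some, lenSum_append]
  simp [lenSum]

lemma absPos_lt (words : List String) : ∀ (j o : Nat) (hj : j < words.length),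
    o < words[j].toList.length → lenSum (words.take j) + o < lenSum words := by
  intro j o hj ho
  induction words generalizing j with
  | nil => simp at hj
  | cons w t ih =>
    cases j with
    | zero => simp [lenSum] at ho ⊢; omega
    | succ j =>
      have := ih j (by simpa using hj) (by simpa using ho)
      simp [lenSum] at this ⊢
      omega

lemma flat_getD (words : List String) : ∀ (j o : Nat) (hj : j < words.length),
    o < words[j].toList.length →
    (flatW words).getD (lenSum (words.take j) + o) ' ' = words[j].toList.getD o ' ' := by
  intro j o hj ho
  induction words generalizing j with
  | nil => simp at hj
  | cons w t ih =>
    cases j with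
    | zero =>
      simp only [List.take_zero, lenSum, List.map_nil, List.sum_nil, Nat.zero_add]
      rw [show flatW (w :: t) = w.toList ++ flatW t from by simp [flatW]]
      rw [List.getD_append _ _ _ _ (by simpa using ho)]
      simp
    | succ j =>
      have hj' : j < t.length := by simpa using hj
      have ho' : o < t[j].toList.length := by simpa using ho
      rw [show flatW (w :: t) = w.toList ++ flatW t from by simp [flatW],
        show lenSum ((w :: t).take (j+1)) = w.toList.length + lenSum (t.take j) from by
          simp [lenSum],
        Nat.add_assoc, getD_append_len _ _ _ rfl]
      simpa using ih j hj' ho'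

lemma locOf_spec (words : List String) : ∀ (p : Nat), p < lenSum words →
    (locOf words p).1 < words.length
    ∧ (locOf words p).2 < ((words.getD (locOf words p).1 "").toList).length
    ∧ lenSum (words.take (locOf words p).1) + (locOf words p).2 = p := by
  induction words with
  | nil => intro p hp; simp [lenSum] at hp
  | cons w t ih =>
    intro p hp
    by_cases h : p < w.toList.length
    · rw [locOf, if_pos h]
      exact ⟨by simp, by simpa using h, by simp [lenSum]⟩
    · rw [locOf, if_neg h]
      have hp' : p - w.toList.length < lenSum t := by
        rw [lenSum_cons] at hp; omega
      obtain ⟨h1, h2, h3⟩ := ih (p - w.toList.length) hp'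
      refine ⟨by simpa using h1, by simpa using h2, ?_⟩
      simp only [List.take_succ_cons, lenSum_cons]
      omega

lemma locOf_absPos (words : List String) : ∀ (j o : Nat) (hj : j < words.length),
    o < words[j].toList.length → locOf words (lenSum (words.take j) + o) = (j, o) := by
  induction words with
  | nil => intro j o hj ho; simp at hj
  | cons w t ih =>
    intro j o hj ho
    cases j with
    | zero =>
      rw [show lenSum ((w :: t).take 0) = 0 from rfl, Nat.zero_add, locOf,
        if_pos (by simpa using ho)]
    | succ j =>
      rw [List.take_succ_cons, lenSum_cons, locOf,
        if_neg (by omega),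
        show w.toList.length + lenSum (t.take j) + o - w.toList.length
          = lenSum (t.take j) + o by omega,
        ih j o (by simpa using hj) (by simpa using ho)]

lemma sokAll_getD (words : List String) : ∀ (j o : Nat) (hj : j < words.length),
    o < words[j].toList.length →
    (sokAll words).getD (lenSum (words.take j) + o) false = (words[j].toList.take o).all isSp := by
  intro j o hj ho
  induction words generalizing j with
  | nil => simp at hj
  | cons w t ih =>
    cases j with
    | zero =>
      simp only [List.take_zero, lenSum, List.map_nil, List.sum_nil, Nat.zero_add]
      rw [show sokAll (w :: t) = sokSeg w.toList ++ sokAll t from rfl,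
        List.getD_append _ _ _ _ (by simp [sokSeg]; simpa using ho),
        List.getD_eq_getElem _ _ (by simp [sokSeg]; simpa using ho)]
      simp [sokSeg]
    | succ j =>
      rw [show sokAll (w :: t) = sokSeg w.toList ++ sokAll t from rfl,
        show lenSum ((w :: t).take (j+1)) = w.toList.length + lenSum (t.take j) from by
          simp [lenSum],
        Nat.add_assoc, getD_append_len _ _ _ (by simp [sokSeg])]
      simpa using ih j (by simpa using hj) (by simpa using ho)

lemma eokAll_getD (words : List String) : ∀ (j o : Nat) (hj : j < words.length),
    o < words[j].toList.length →
    (eokAll words).getD (lenSum (words.take j) + o) false = (words[j].toList.drop (o+1)).all isSp := by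
  intro j o hj ho
  induction words generalizing j with
  | nil => simp at hj
  | cons w t ih =>
    cases j with
    | zero =>
      simp only [List.take_zero, lenSum, List.map_nil, List.sum_nil, Nat.zero_add]
      rw [show eokAll (w :: t) = eokSeg w.toList ++ eokAll t from rfl,
        List.getD_append _ _ _ _ (by simp [eokSeg]; simpa using ho),
        List.getD_eq_getElem _ _ (by simp [eokSeg]; simpa using ho)]
      simp [eokSeg]
    | succ j =>
      rw [show eokAll (w :: t) = eokSeg w.toList ++ eokAll t from rfl,
        show lenSum ((w :: t).take (j+1)) = w.toList.length + lenSum (t.take j) from by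
          simp [lenSum],
        Nat.add_assoc, getD_append_len _ _ _ (by simp [eokSeg])]
      simpa using ih j (by simpa using hj) (by simpa using ho)

lemma widxAll_getD (words : List String) : ∀ (k : Int) (j o : Nat) (hj : j < words.length),
    o < words[j].toList.length →
    (widxAll words k).getD (lenSum (words.take j) + o) 0 = k + (j : Int) := by
  intro k j o hj ho
  induction words generalizing j k with
  | nil => simp at hj
  | cons w t ih =>
    cases j with
    | zero =>
      simp only [List.take_zero, lenSum, List.map_nil, List.sum_nil, Nat.zero_add]
      rw [show widxAll (w :: t) k = List.replicate w.toList.length k ++ widxAll t (k+1) from rfl,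
        List.getD_append _ _ _ _ (by simp; simpa using ho),
        List.getD_eq_getElem _ _ (by simp; simpa using ho)]
      simp
    | succ j =>
      rw [show widxAll (w :: t) k = List.replicate w.toList.length k ++ widxAll t (k+1) from rfl,
        show lenSum ((w :: t).take (j+1)) = w.toList.length + lenSum (t.take j) from by
          simp [lenSum],
        Nat.add_assoc, getD_append_len _ _ _ (by simp)]
      rw [ih (k+1) j (by simpa using hj) (by simpa using ho)]
      push_cast
      ring

-- the cross-word cursor finds the mention iff the flattened text matches, and reports the
-- location of the last matched character
lemma matchFrom_eq (words : List String) (tgt : List Char) :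
    ∀ (fuel j o k : Nat), j ≤ words.length →
    (j < words.length → o ≤ (words.getD j "").toList.length) →
    (j = words.length → o = 0) →
    k < tgt.length →
    (tgt.length - k) + (words.length - j) < fuel →
    matchFrom words tgt fuel j o k =
      (if ((flatW words).drop (lenSum (words.take j) + o)).take (tgt.length - k) = tgt.drop k
       then some (locOf words (lenSum (words.take j) + o + (tgt.length - k) - 1))
       else none) := by
  intro fuel
  induction fuel with
  | zero => intro j o k h1 h2 h3 h4 h5; omega
  | succ fuel ih =>
    intro j o k hj ho hjm hk hfuel
    rw [matchFrom, if_pos hk]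
    by_cases hjlen : j < words.length
    · rw [if_pos hjlen]
      by_cases hskip : (words.getD j "").toList.length ≤ o
      · rw [if_pos hskip]
        have hoe : o = (words.getD j "").toList.length := by
          have := ho hjlen; omega
        have habs : lenSum (words.take (j+1)) + 0 = lenSum (words.take j) + o := by
          rw [lenSum_take_succ words j hjlen, hoe, List.getD_eq_getElem _ _ hjlen]
          omega
        rw [ih (j+1) 0 k (by omega) (fun _ => by omega) (fun _ => rfl) hk (by omega), habs]
      · rw [if_neg hskip]
        have holt : o < words[j].toList.length := by
          rw [List.getD_eq_getElem _ _ hjlen] at hskip; omega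
        have ha : lenSum (words.take j) + o < lenSum words := absPos_lt words j o hjlen holt
        have hn : (flatW words).length = lenSum words := by rw [flatW, lenSum_eq]
        have halt : lenSum (words.take j) + o < (flatW words).length := by omega
        have hchar : (flatW words).getD (lenSum (words.take j) + o) ' '
            = (words.getD j "").toList.getD o ' ' := by
          rw [List.getD_eq_getElem _ _ hjlen]
          exact flat_getD words j o hjlen holt
        have hdrop : ((flatW words).drop (lenSum (words.take j) + o)).take (tgt.length - k)
            = (flatW words)[lenSum (words.take j) + o]
              :: (((flatW words).drop (lenSum (words.take j) + o + 1)).take (tgt.length - (k+1))) := by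
          rw [List.drop_eq_getElem_cons halt, show tgt.length - k = (tgt.length - (k+1)) + 1 by omega,
            List.take_succ_cons]
        have hdropt : tgt.drop k = tgt[k] :: tgt.drop (k+1) := List.drop_eq_getElem_cons hk
        by_cases hchr : (words.getD j "").toList.getD o ' ' = tgt.getD k ' '
        · rw [if_neg (by simpa using hchr)]
          have hheads : (flatW words)[lenSum (words.take j) + o] = tgt[k] := by
            have e1 : (flatW words)[lenSum (words.take j) + o]
                = (flatW words).getD (lenSum (words.take j) + o) ' ' :=
              (List.getD_eq_getElem _ _ halt).symm
            have e2 : tgt[k] = tgt.getD k ' ' := (List.getD_eq_getElem _ _ hk).symm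
            rw [e1, e2, hchar, hchr]
          by_cases hklast : k + 1 < tgt.length
          · rw [ih j (o+1) (k+1) hj (fun _ => by omega) (fun hc => by omega) hklast (by omega)]
            have hidx : lenSum (words.take j) + (o + 1) + (tgt.length - (k+1)) - 1
                = lenSum (words.take j) + o + (tgt.length - k) - 1 := by omega
            have hcond : (((flatW words).drop (lenSum (words.take j) + (o+1))).take (tgt.length - (k+1))
                  = tgt.drop (k+1))
                ↔ (((flatW words).drop (lenSum (words.take j) + o)).take (tgt.length - k) = tgt.drop k) := by
              rw [hdrop, hdropt, List.cons_eq_cons, show lenSum (words.take j) + (o+1)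
                = lenSum (words.take j) + o + 1 by omega]
              constructor
              · intro h; exact ⟨hheads, h⟩
              · intro h; exact h.2
            by_cases hc : ((flatW words).drop (lenSum (words.take j) + o)).take (tgt.length - k) = tgt.drop k
            · rw [if_pos (hcond.mpr hc), if_pos hc, hidx]
            · rw [if_neg (fun hx => hc (hcond.mp hx)), if_neg hc]
          · -- k + 1 = tgt.length: one more unfolding returns (j, o)
            have hkm : k + 1 = tgt.length := by omega
            obtain ⟨f', hf'⟩ : ∃ f', fuel = f' + 1 := ⟨fuel - 1, by omega⟩
            rw [hf', matchFrom, if_neg (by omega)]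
            have htake1 : ((flatW words).drop (lenSum (words.take j) + o)).take (tgt.length - k)
                = [(flatW words)[lenSum (words.take j) + o]] := by
              rw [List.drop_eq_getElem_cons halt, show tgt.length - k = 0 + 1 by omega,
                List.take_succ_cons, List.take_zero]
            have hdt : tgt.drop k = [tgt[k]] := by
              rw [List.drop_eq_getElem_cons hk, hkm, List.drop_length]
            rw [if_pos (by rw [htake1, hdt, hheads])]
            have : locOf words (lenSum (words.take j) + o + (tgt.length - k) - 1)
                = locOf words (lenSum (words.take j) + o) := by
              congr 1; omega
            rw [this, locOf_absPos words j o hjlen holt, show o + 1 - 1 = o by omega]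
        · -- mismatch
          rw [if_pos (by simpa using hchr)]
          rw [if_neg]
          intro hcond
          rw [hdrop, hdropt, List.cons_eq_cons] at hcond
          apply hchr
          rw [← List.getD_eq_getElem _ ' ' halt, ← List.getD_eq_getElem _ ' ' hk] at hcond
          rw [← hchar, hcond.1]
    · -- j = words.length: text exhausted, no match possible
      rw [if_neg hjlen]
      have hje : j = words.length := by omega
      have ho0 : o = 0 := hjm hje
      rw [if_neg]
      intro hcond
      have : lenSum (words.take j) + o = lenSum words := by
        rw [hje, ho0, List.take_of_length_le (le_refl _)]
        omega
      rw [this, show lenSum words = (flatW words).length from by rw [flatW, lenSum_eq],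
        List.drop_length, List.take_nil] at hcond
      have : (tgt.drop k).length = 0 := by rw [← hcond]; rfl
      rw [List.length_drop] at this
      omega

-- fold on a list whose every step fixes the accumulator
lemma foldl_fixed {α β : Type} (f : α → β → α) (l : List β)
    (h : ∀ acc x, x ∈ l → f acc x = acc) : ∀ acc, l.foldl f acc = acc := by
  induction l with
  | nil => intro acc; rfl
  | cons x t ih =>
    intro acc
    rw [List.foldl_cons, h acc x (by simp)]
    exact ih (fun acc y hy => h acc y (by simp [hy])) acc

-- B's nested word/offset fold equals a single fold of g over the absolute positions
lemma nestedFold (words : List String)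
    (body : List (List Int) → Int → String → Nat → List (List Int))
    (g : List (List Int) → Nat → List (List Int))
    (hbg : ∀ spans (j o : Nat) (hj : j < words.length), o < words[j].toList.length →
      body spans (j : Int) words[j] o = g spans (lenSum (words.take j) + o)) :
    ∀ (t : List String) (j0 : Nat), words.drop j0 = t →
    ∀ spans, (PySem.List.enumerate t (j0 : Int)).foldl
        (fun spans p => (List.range p.2.toList.length).foldl
          (fun s off => body s p.1 p.2 off) spans) spans
      = (List.range' (lenSum (words.take j0)) (lenSum t)).foldl g spans := by
  intro t
  induction t with
  | nil =>
    intro j0 hdrop spans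
    rw [show PySem.List.enumerate ([] : List String) (j0:Int) = [] from rfl]
    simp [lenSum]
  | cons w t' ih =>
    intro j0 hdrop spans
    have hj0 : j0 < words.length := by
      by_contra hc
      rw [List.drop_eq_nil_of_le (by omega)] at hdrop
      simp at hdrop
    have hw : words[j0] = w := by
      have h1 : words[j0 + 0]? = some w := by
        rw [← List.getElem?_drop, hdrop]
        rfl
      have h2 : words[j0]? = some words[j0] := List.getElem?_eq_getElem hj0
      rw [Nat.add_zero] at h1
      rw [h1] at h2
      exact (Option.some.injEq _ _ ▸ h2).symm
    have hdrop' : words.drop (j0+1) = t' := by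
      have : words.drop (j0+1) = (words.drop j0).drop 1 := by rw [List.drop_drop]
      rw [this, hdrop]; rfl
    rw [show PySem.List.enumerate (w :: t') (j0:Int)
        = ((j0:Int), w) :: PySem.List.enumerate t' ((j0:Int)+1) from rfl, List.foldl_cons]
    have hinner : (List.range w.toList.length).foldl (fun s off => body s (j0:Int) w off) spans
        = (List.range' (lenSum (words.take j0)) w.toList.length).foldl g spans := by
      rw [List.range'_eq_map_range, List.foldl_map]
      apply PySem.List.foldl_congr_mem
      intro s off hoff
      rw [List.mem_range] at hoff
      have := hbg s j0 off hj0 (by rw [hw]; exact hoff)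
      rw [hw] at this
      rw [this]
    rw [hinner]
    have hcast : ((j0:Int)+1) = ((j0+1 : Nat) : Int) := by push_cast; ring
    rw [hcast, ih (j0+1) hdrop']
    have hsum : lenSum (w :: t') = w.toList.length + lenSum t' := by simp [lenSum]
    rw [lenSum_take_succ words j0 hj0, hw, hsum, ← List.range'_append_1, List.foldl_append]

-- the two ports agree
lemma portsAgree (words : List String) (mention : String)
    (hpre : ∀ w ∈ words, w ≠ "") :
    char_level_align words mention = char_level_align_alt words mention := by
  unfold char_level_align char_level_align_alt
  simp only []
  set rm : List Char := PySem.Chars.replace mention.toList [' '] [] with hrm_def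
  have hrt : PySem.Chars.join [] (words.map String.toList) = flatW words := by
    rw [flatW]
    generalize (words.map String.toList) = xs
    induction xs with
    | nil => simp [PySem.Chars.join, List.intercalate]
    | cons h t ih => cases t <;> simp_all [PySem.Chars.join, List.intercalate, List.intersperse]
  rw [hrt]
  have hn : (flatW words).length = lenSum words := by rw [flatW, lenSum_eq]
  by_cases hm0 : rm.length = 0
  · rw [if_pos hm0, hm0]
    have : ∀ (l : List Int) (acc : List (List Int)) (st en : List Int),
        l.foldl (fun spans ii => aInner (flatW words) rm st en 0 ii.toNat 0 spans) acc = acc := by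
      intro l
      induction l with
      | nil => intro acc st en; rfl
      | cons x xs ihl => intro acc st en; rw [List.foldl_cons, aInner_zero]; exact ihl acc st en
    exact this _ _ _ _
  · rw [if_neg hm0]
    have hm : 0 < rm.length := by omega
    -- A phase 1
    have h1A := phase1A words 0 [] [] rfl hpre
    simp only [List.nil_append, List.length_nil, Nat.zero_add] at h1A
    rw [hn, h1A]
    -- A main loop = fold of bStep over range t, t = (n - m + 1).toNat
    have hA : (PySem.List.pyRange 0 ((lenSum words : Int) - (rm.length : Int) + 1) 1).foldl
        (fun spans ii => aInner (flatW words) rm (startAll words 0) (endAll words 0) rm.length ii.toNat 0 spans) []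
        = (List.range ((lenSum words : Int) - (rm.length : Int) + 1).toNat).foldl (bStep words rm) [] := by
      rw [PySem.List.pyRange_one, List.foldl_map,
        show ((lenSum words : Int) - (rm.length : Int) + 1 - 0) = ((lenSum words : Int) - (rm.length : Int) + 1) by ring]
      apply PySem.List.foldl_congr_mem
      intro spans k hkmem
      rw [List.mem_range] at hkmem
      have hkn : k + rm.length ≤ lenSum words := by omega
      have htn : ((0 : Int) + (k : Nat)).toNat = k := by omega
      rw [htn]
      rw [innerEq (flatW words) rm (startAll words 0) (endAll words 0) rm.length k hm rfl
        (by omega) rm.length 0 spans (by omega) (by omega)]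
      simp only [Nat.add_zero, Nat.sub_zero, List.drop_zero]
      obtain ⟨hs_eq, hwi⟩ := corrStart words 0 le_rfl k (by omega)
      obtain ⟨he_eq, hwj⟩ := corrEnd words 0 le_rfl (k + rm.length - 1) (by omega)
      rw [bStep]
      by_cases hsl : ((flatW words).drop k).take rm.length = rm
      · rw [if_pos hsl]
        cases hsv : (sokAll words).getD k false
        · have hs0 : (startAll words 0).getD k (-1) = -1 := by rw [hs_eq, hsv]; simp
          rw [if_neg (by rw [hs0]; simp), if_neg (by simp)]
        · cases hev : (eokAll words).getD (k + rm.length - 1) false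
          · have he0 : (endAll words 0).getD (k + rm.length - 1) (-1) = -1 := by
              rw [he_eq, hev]; simp
            rw [if_neg (by rw [he0]; simp), if_neg (by simp)]
          · have hs1 : (startAll words 0).getD k (-1) = (widxAll words 0).getD k 0 := by
              rw [hs_eq, hsv]; simp
            have he1 : (endAll words 0).getD (k + rm.length - 1) (-1)
                = (widxAll words 0).getD (k + rm.length - 1) 0 := by
              rw [he_eq, hev]; simp
            rw [if_pos ⟨by rw [hs1]; omega, by rw [he1]; omega⟩,
              if_pos ⟨hsl, rfl, rfl⟩, hs1, he1]
      · rw [if_neg hsl, if_neg (fun hc => hsl hc.1)]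
    rw [hA]
    -- extend A's range to all n positions (the extra ones never match)
    have hext : (List.range ((lenSum words : Int) - (rm.length : Int) + 1).toNat).foldl (bStep words rm) []
        = (List.range (lenSum words)).foldl (bStep words rm) [] := by
      set t := ((lenSum words : Int) - (rm.length : Int) + 1).toNat with ht_def
      have htle : t ≤ lenSum words := by omega
      have hfix : ∀ acc, ((List.range (lenSum words - t)).map (fun x => t + x)).foldl
          (bStep words rm) acc = acc := by
        apply foldl_fixed
        intro acc x hx
        rw [List.mem_map] at hx
        obtain ⟨kk, hkk, hxe⟩ := hx
        rw [List.mem_range] at hkk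
        have hxbig : lenSum words < x + rm.length := by omega
        rw [bStep, if_neg]
        rintro ⟨hc, -⟩
        have : (((flatW words).drop x).take rm.length).length = rm.length := by rw [hc]
        rw [List.length_take, List.length_drop, hn] at this
        omega
      rw [show lenSum words = t + (lenSum words - t) by omega, List.range_add, List.foldl_append,
        hfix]
    rw [hext]
    -- B side: nested fold = fold of bStep over range n
    have hB : (PySem.List.enumerate words).foldl
        (fun spans p => (List.range p.2.toList.length).foldl
          (fun s off =>
            if (p.2.toList.take off).all (fun c => specialToken.contains c) then
              match matchFrom words rm (rm.length + words.length + 1) p.1.toNat off 0 with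
              | none => s
              | some (j, oe) =>
                if ((words.getD j "").toList.drop (oe + 1)).all (fun c => specialToken.contains c) then
                  s ++ [[p.1, (j : Int)]]
                else s
            else s) spans) []
        = (List.range' (lenSum (words.take 0)) (lenSum words)).foldl (bStep words rm) [] := by
      have := nestedFold words
        (fun s wi w off =>
          if (w.toList.take off).all (fun c => specialToken.contains c) then
            match matchFrom words rm (rm.length + words.length + 1) wi.toNat off 0 with
            | none => s
            | some (j, oe) =>
              if ((words.getD j "").toList.drop (oe + 1)).all (fun c => specialToken.contains c) then
                s ++ [[wi, (j : Int)]]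
              else s
          else s)
        (bStep words rm) ?_ words 0 (by simp) []
      · exact this
      intro spans j o hj ho
      simp only [Int.toNat_natCast]
      rw [matchFrom_eq words rm (rm.length + words.length + 1) j o 0 (by omega)
        (fun _ => by rw [List.getD_eq_getElem _ _ hj]; omega) (fun hc => by omega) hm (by omega)]
      simp only [Nat.sub_zero, List.drop_zero]
      set a := lenSum (words.take j) + o with ha_def
      rw [bStep]
      by_cases hsok : (words[j].toList.take o).all (fun c => specialToken.contains c) = true
      · rw [if_pos hsok]
        have hsokD : (sokAll words).getD a false = true := by
          rw [sokAll_getD words j o hj ho]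
          exact hsok
        by_cases hmatch : ((flatW words).drop a).take rm.length = rm
        · rw [if_pos hmatch]
          have hameln : a + rm.length ≤ lenSum words := by
            have : (((flatW words).drop a).take rm.length).length = rm.length := by rw [hmatch]
            rw [List.length_take, List.length_drop, hn] at this
            omega
          have hend : a + rm.length - 1 < lenSum words := by omega
          obtain ⟨hl1, hl2, hl3⟩ := locOf_spec words (a + rm.length - 1) hend
          set j' := (locOf words (a + rm.length - 1)).1 with hj'_def
          set oe := (locOf words (a + rm.length - 1)).2 with hoe_def
          have hshow : locOf words (a + rm.length - 1) = (j', oe) := rfl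
          rw [hshow]
          simp only []
          have hoe' : oe < words[j'].toList.length := by
            rw [List.getD_eq_getElem _ _ hl1] at hl2; exact hl2
          have heokD : (eokAll words).getD (a + rm.length - 1) false
              = (words[j'].toList.drop (oe + 1)).all isSp := by
            rw [← hl3]
            exact eokAll_getD words j' oe hl1 hoe'
          have hwidxa : (widxAll words 0).getD a 0 = (j : Int) := by
            rw [widxAll_getD words 0 j o hj ho]; ring
          have hwidxe : (widxAll words 0).getD (a + rm.length - 1) 0 = (j' : Int) := by
            rw [← hl3, widxAll_getD words 0 j' oe hl1 hoe']; ring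
          rw [List.getD_eq_getElem _ _ hl1]
          by_cases heok : (words[j'].toList.drop (oe + 1)).all isSp = true
          · rw [if_pos (by rw [show (fun c => specialToken.contains c) = isSp from rfl]; exact heok),
              if_pos ⟨hmatch, hsokD, by rw [heokD]; exact heok⟩, hwidxa, hwidxe]
          · rw [if_neg (by rw [show (fun c => specialToken.contains c) = isSp from rfl]; exact heok),
              if_neg (by rintro ⟨-, -, hc⟩; rw [heokD] at hc; exact heok hc)]
        · rw [if_neg hmatch, if_neg (by rintro ⟨hc, -⟩; exact hmatch hc)]
      · rw [if_neg hsok, if_neg]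
        rintro ⟨-, hc, -⟩
        rw [sokAll_getD words j o hj ho] at hc
        exact hsok hc
    rw [hB]
    rw [show lenSum (words.take 0) = 0 from rfl, ← List.range_eq_range']

-- ===== VERDICT (by name: the statement is the Claim_ definition above) =====
theorem char_level_align_spec : Claim_equal_char_level_align := by
  intro words mention _ hpre
  unfold Pre_char_level_align at hpre
  unfold Spec_char_level_align
  exact portsAgree words mention hpre
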